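-- pv_equiv track=rewrite | github.com/marelucent/the-london-lark | apply_manual_fixes_round2.py | categorize_kept_venues
-- ===== SOURCE A (Python) =====
-- def categorize_kept_venues(manual_review_list, venues):
--     """Categorize the venues we're keeping as-is."""
--     categories = {
--         "various_london_venues": [],
--         "generic_areas": [],
--         "valid_unlisted_neighborhoods": [],
--         "pop_up_touring": [],
--         "private_undisclosed": []
--     }
--
--     for item in manual_review_list:
--         venue_id = item["venue_id"]
--         venue = venues[venue_id]
--         location = venue.get("location", "")
--
--         if location == "Various London venues":
--             categories["various_london_venues"].append({
--                 "id": venue_id,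
--                 "name": venue.get("name", "Unknown"),
--                 "location": location
--             })
--         elif "pop-up" in location.lower() or "touring" in location.lower() or "rotating" in location.lower():
--             categories["pop_up_touring"].append({
--                 "id": venue_id,
--                 "name": venue.get("name", "Unknown"),
--                 "location": location
--             })
--         elif "private" in location.lower() or "exact location shared" in location.lower():
--             categories["private_undisclosed"].append({
--                 "id": venue_id,
--                 "name": venue.get("name", "Unknown"),
--                 "location": location
--             })
--         elif any(area in location for area in ["East London", "West London", "North London", "South London", "Central London", "North West London", "South East London"]):
--             categories["generic_areas"].append({
--                 "id": venue_id,
--                 "name": venue.get("name", "Unknown"),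
--                 "location": location
--             })
--         else:
--             # Likely a valid neighborhood just not in approved list
--             categories["valid_unlisted_neighborhoods"].append({
--                 "id": venue_id,
--                 "name": venue.get("name", "Unknown"),
--                 "location": location
--             })
--
--     return categories
-- ===== SOURCE B (Python) =====
-- AREAS = ["East London", "West London", "North London", "South London",
--          "Central London", "North West London", "South East London"]
--
--
-- def categorize_kept_venues(manual_review_list, venues):
--     """Categorize the venues we're keeping as-is."""
--     pending = []
--     for item in manual_review_list:
--         venue_id = item["venue_id"]
--         venue = venues[venue_id]
--         location = venue.get("location", "")
--         pending.append((location, {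
--             "id": venue_id,
--             "name": venue.get("name", "Unknown"),
--             "location": location,
--         }))
--
--     def sift(pred):
--         nonlocal pending
--         hit = [entry for loc, entry in pending if pred(loc)]
--         pending = [(loc, entry) for loc, entry in pending if not pred(loc)]
--         return hit
--
--     various = sift(lambda loc: loc == "Various London venues")
--     pop_up = sift(lambda loc: "pop-up" in loc.lower() or "touring" in loc.lower()
--                   or "rotating" in loc.lower())
--     private = sift(lambda loc: "private" in loc.lower()
--                    or "exact location shared" in loc.lower())
--     generic = sift(lambda loc: any(area in loc for area in AREAS))
--     return {
--         "various_london_venues": various,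
--         "generic_areas": generic,
--         "valid_unlisted_neighborhoods": [entry for _, entry in pending],
--         "pop_up_touring": pop_up,
--         "private_undisclosed": private,
--     }
-- ===== Notes on version B (the rewrite author's own statement) =====
-- stated objective: alternative
-- what changed: Replaced the per-item if/elif dispatch with a multi-pass sieve: build (location, entry) pairs once, then four successive whole-list sift passes each extract one bucket and shrink the pending list (priority comes from removal, not from an ordered chain); the leftovers are valid_unlisted_neighborhoods.
import Mathlib
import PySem

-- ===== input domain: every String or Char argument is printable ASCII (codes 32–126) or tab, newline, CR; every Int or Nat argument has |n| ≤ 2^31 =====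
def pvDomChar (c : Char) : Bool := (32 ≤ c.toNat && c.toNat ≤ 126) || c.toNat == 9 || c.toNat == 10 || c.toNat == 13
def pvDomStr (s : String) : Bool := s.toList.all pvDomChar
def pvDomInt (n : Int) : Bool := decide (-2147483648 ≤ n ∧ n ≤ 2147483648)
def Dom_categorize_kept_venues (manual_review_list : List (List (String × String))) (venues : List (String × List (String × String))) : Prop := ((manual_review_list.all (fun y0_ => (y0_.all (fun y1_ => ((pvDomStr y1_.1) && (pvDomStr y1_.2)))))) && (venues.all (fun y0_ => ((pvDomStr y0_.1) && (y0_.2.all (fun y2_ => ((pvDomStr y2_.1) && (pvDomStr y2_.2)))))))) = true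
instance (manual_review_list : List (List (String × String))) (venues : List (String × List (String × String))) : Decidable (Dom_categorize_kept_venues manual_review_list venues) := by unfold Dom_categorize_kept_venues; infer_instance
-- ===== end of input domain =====

-- B is a multi-pass sieve: tag pairs once, then successive sift passes peel off each bucket (same return value; no observable mutation).

-- ===== PORT A =====
-- literal transliteration: a five-bucket dict, one loop, if/elif chain appending to categories[bucket]
def categorize_kept_venues (manual_review_list : List (List (String × String))) (venues : List (String × List (String × String))) : List (String × List (List (String × String))) :=
  let categories : PySem.Dict String (List (List (String × String))) :=
    PySem.Dict.mk [("various_london_venues", []), ("generic_areas", []),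
                   ("valid_unlisted_neighborhoods", []), ("pop_up_touring", []), ("private_undisclosed", [])]
  (manual_review_list.foldl (fun cats item =>
      let venue_id := (PySem.Dict.mk item).getD "venue_id" ""          -- item["venue_id"] (Pre_ guarantees the key)
      let venue := (PySem.Dict.mk venues).getD venue_id []             -- venues[venue_id] (Pre_ guarantees the key)
      let location := (PySem.Dict.mk venue).getD "location" ""
      let entry : List (String × String) :=
        [("id", venue_id), ("name", (PySem.Dict.mk venue).getD "name" "Unknown"), ("location", location)]
      if location == "Various London venues" then
        cats.modify "various_london_venues" [] (· ++ [entry])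
      else if PySem.Str.isIn "pop-up" (PySem.Str.lower location) || PySem.Str.isIn "touring" (PySem.Str.lower location) || PySem.Str.isIn "rotating" (PySem.Str.lower location) then
        cats.modify "pop_up_touring" [] (· ++ [entry])
      else if PySem.Str.isIn "private" (PySem.Str.lower location) || PySem.Str.isIn "exact location shared" (PySem.Str.lower location) then
        cats.modify "private_undisclosed" [] (· ++ [entry])
      else if (["East London", "West London", "North London", "South London", "Central London", "North West London", "South East London"] : List String).any (fun a => PySem.Str.isIn a location) then
        cats.modify "generic_areas" [] (· ++ [entry])
      else
        cats.modify "valid_unlisted_neighborhoods" [] (· ++ [entry])) categories).items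

-- ===== PORT B =====
def pvAreas : List String :=
  ["East London", "West London", "North London", "South London",
   "Central London", "North West London", "South East London"]

-- the four sift predicates of Source B, over the location string
def pvPred1 (loc : String) : Bool := loc == "Various London venues"
def pvPred2 (loc : String) : Bool :=
  PySem.Str.isIn "pop-up" (PySem.Str.lower loc) || PySem.Str.isIn "touring" (PySem.Str.lower loc) || PySem.Str.isIn "rotating" (PySem.Str.lower loc)
def pvPred3 (loc : String) : Bool :=
  PySem.Str.isIn "private" (PySem.Str.lower loc) || PySem.Str.isIn "exact location shared" (PySem.Str.lower loc)
def pvPred4 (loc : String) : Bool := pvAreas.any (fun a => PySem.Str.isIn a loc)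

-- Source B's first loop body: the (location, entry) pair for one item
def pvEntry (venues : List (String × List (String × String))) (item : List (String × String)) : String × List (String × String) :=
  let venue_id := (PySem.Dict.mk item).getD "venue_id" ""
  let venue := (PySem.Dict.mk venues).getD venue_id []
  let location := (PySem.Dict.mk venue).getD "location" ""
  (location, [("id", venue_id), ("name", (PySem.Dict.mk venue).getD "name" "Unknown"), ("location", location)])

def categorize_kept_venues_alt (manual_review_list : List (List (String × String))) (venues : List (String × List (String × String))) : List (String × List (List (String × String))) :=
  let pending0 := manual_review_list.map (pvEntry venues)
  -- sift 1: various
  let various := (pending0.filter (fun p => pvPred1 p.1)).map (·.2)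
  let pending1 := pending0.filter (fun p => !pvPred1 p.1)
  -- sift 2: pop-up / touring
  let pop_up := (pending1.filter (fun p => pvPred2 p.1)).map (·.2)
  let pending2 := pending1.filter (fun p => !pvPred2 p.1)
  -- sift 3: private
  let priv := (pending2.filter (fun p => pvPred3 p.1)).map (·.2)
  let pending3 := pending2.filter (fun p => !pvPred3 p.1)
  -- sift 4: generic areas
  let generic := (pending3.filter (fun p => pvPred4 p.1)).map (·.2)
  let pending4 := pending3.filter (fun p => !pvPred4 p.1)
  [("various_london_venues", various), ("generic_areas", generic),
   ("valid_unlisted_neighborhoods", pending4.map (·.2)),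
   ("pop_up_touring", pop_up), ("private_undisclosed", priv)]

-- ===== PRECONDITION & SPEC =====
-- Pre_ excludes exactly the inputs where Python A raises KeyError: an item without a "venue_id" key, or a venue_id absent from venues.
def Pre_categorize_kept_venues (manual_review_list : List (List (String × String))) (venues : List (String × List (String × String))) : Prop :=
  manual_review_list.all (fun item =>
    (PySem.Dict.mk item).contains "venue_id" &&
    (PySem.Dict.mk venues).contains ((PySem.Dict.mk item).getD "venue_id" "")) = true
instance (manual_review_list : List (List (String × String))) (venues : List (String × List (String × String))) : Decidable (Pre_categorize_kept_venues manual_review_list venues) := by unfold Pre_categorize_kept_venues; infer_instance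

def pvWitness_categorize_kept_venues : (List (List (String × String))) × (List (String × List (String × String))) :=
  ([[("venue_id", "v1")]], [("v1", [("location", "Soho"), ("name", "The Lark")])])

def Spec_categorize_kept_venues (manual_review_list : List (List (String × String))) (venues : List (String × List (String × String))) (out : List (String × List (List (String × String)))) : Prop := out = categorize_kept_venues_alt manual_review_list venues
instance (manual_review_list : List (List (String × String))) (venues : List (String × List (String × String))) (out : List (String × List (List (String × String)))) : Decidable (Spec_categorize_kept_venues manual_review_list venues out) := by unfold Spec_categorize_kept_venues; infer_instance

-- ===== CLAIM (what is proved, stated in full; the proofs are below) =====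
def Claim_equal_categorize_kept_venues : Prop := ∀ (manual_review_list : List (List (String × String))) (venues : List (String × List (String × String))), Dom_categorize_kept_venues manual_review_list venues → Pre_categorize_kept_venues manual_review_list venues → Spec_categorize_kept_venues manual_review_list venues (categorize_kept_venues manual_review_list venues)

-- ===== LEMMAS AND PROOFS =====

-- proof helpers: the bucket A's if/elif chain assigns to a location, and the tagged pair per item
def pvKeys : List String :=
  ["various_london_venues", "generic_areas", "valid_unlisted_neighborhoods",
   "pop_up_touring", "private_undisclosed"]

def pvBucket (loc : String) : String :=
  if pvPred1 loc then "various_london_venues"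
  else if pvPred2 loc then "pop_up_touring"
  else if pvPred3 loc then "private_undisclosed"
  else if pvPred4 loc then "generic_areas"
  else "valid_unlisted_neighborhoods"

def pvTag (venues : List (String × List (String × String))) (item : List (String × String)) : String × List (String × String) :=
  (pvBucket (pvEntry venues item).1, (pvEntry venues item).2)

-- A's loop body equals "modify the bucket pvBucket picks, appending the entry"
theorem pvStep_eq (venues : List (String × List (String × String)))
    (cats : PySem.Dict String (List (List (String × String)))) (item : List (String × String)) :
    (let venue_id := (PySem.Dict.mk item).getD "venue_id" ""
     let venue := (PySem.Dict.mk venues).getD venue_id []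
     let location := (PySem.Dict.mk venue).getD "location" ""
     let entry : List (String × String) :=
       [("id", venue_id), ("name", (PySem.Dict.mk venue).getD "name" "Unknown"), ("location", location)]
     if location == "Various London venues" then
       cats.modify "various_london_venues" [] (· ++ [entry])
     else if PySem.Str.isIn "pop-up" (PySem.Str.lower location) || PySem.Str.isIn "touring" (PySem.Str.lower location) || PySem.Str.isIn "rotating" (PySem.Str.lower location) then
       cats.modify "pop_up_touring" [] (· ++ [entry])
     else if PySem.Str.isIn "private" (PySem.Str.lower location) || PySem.Str.isIn "exact location shared" (PySem.Str.lower location) then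
       cats.modify "private_undisclosed" [] (· ++ [entry])
     else if (["East London", "West London", "North London", "South London", "Central London", "North West London", "South East London"] : List String).any (fun a => PySem.Str.isIn a location) then
       cats.modify "generic_areas" [] (· ++ [entry])
     else
       cats.modify "valid_unlisted_neighborhoods" [] (· ++ [entry]))
    = cats.modify (pvTag venues item).1 [] (· ++ [(pvTag venues item).2]) := by
  simp only [pvTag, pvEntry, pvBucket, pvPred1, pvPred2, pvPred3, pvPred4, pvAreas,
    List.any_cons, List.any_nil, Bool.or_false]
  split_ifs <;> rfl

theorem pvTag_fst_mem (venues : List (String × List (String × String))) (item : List (String × String)) :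
    (pvTag venues item).1 ∈ pvKeys := by
  simp only [pvTag, pvBucket]
  split_ifs <;> decide

-- A equals the grouped form: for each of the five keys, the tagged pairs whose bucket is that key
theorem categorize_kept_venues_eq_grouped (manual_review_list : List (List (String × String))) (venues : List (String × List (String × String))) :
    categorize_kept_venues manual_review_list venues
    = pvKeys.map (fun k => (k, ((manual_review_list.map (pvTag venues)).filter (fun p => p.1 == k)).map (·.2))) := by
  unfold categorize_kept_venues
  dsimp only
  rw [funext₂ (pvStep_eq venues),
      ← List.foldl_map (f := pvTag venues) (g := fun (cats : PySem.Dict String (List (List (String × String)))) p => cats.modify p.1 [] (· ++ [p.2])) (l := manual_review_list)]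
  set pairs := manual_review_list.map (pvTag venues) with hpairs
  set d0 : PySem.Dict String (List (List (String × String))) :=
    PySem.Dict.mk [("various_london_venues", []), ("generic_areas", []),
                   ("valid_unlisted_neighborhoods", []), ("pop_up_touring", []), ("private_undisclosed", [])] with hd0
  have hmem : ∀ p ∈ pairs, p.1 ∈ pvKeys := by
    intro p hp
    rw [hpairs] at hp
    obtain ⟨item, _, rfl⟩ := List.mem_map.mp hp
    exact pvTag_fst_mem venues item
  have hd0keys : d0.keys = pvKeys := by rw [hd0]; rfl
  have hkeys : (pairs.foldl (fun (cats : PySem.Dict String (List (List (String × String)))) p => cats.modify p.1 [] (· ++ [p.2])) d0).keys = pvKeys := by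
    rw [PySem.Dict.keys_foldl_modify_key, hd0keys, PySem.Set.update_eq_append_filter]
    have : ((PySem.Set.ofList (pairs.map (·.1))).filter (fun y => !(PySem.Set.contains pvKeys y))) = [] := by
      rw [List.filter_eq_nil_iff]
      intro k hk
      have hk' : k ∈ pairs.map (·.1) := (PySem.Set.mem_ofList _ _).mp hk
      obtain ⟨p, hp, rfl⟩ := List.mem_map.mp hk'
      simp
      exact hmem p hp
    rw [this, List.append_nil]
  have hnodup : (pairs.foldl (fun (cats : PySem.Dict String (List (List (String × String)))) p => cats.modify p.1 [] (· ++ [p.2])) d0).keys.Nodup := by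
    rw [hkeys]; decide
  rw [PySem.Dict.items_eq_map_keys _ hnodup ([] : List (List (String × String))), hkeys]
  apply List.map_congr_left
  intro k hk
  rw [PySem.Dict.getD_foldl_modify_append]
  have hd0k : d0.getD k [] = [] := by
    rw [hd0]
    simp only [pvKeys, List.mem_cons, List.not_mem_nil, or_false] at hk
    rcases hk with rfl | rfl | rfl | rfl | rfl <;> rfl
  rw [hd0k, List.nil_append]

-- pointwise characterisation of the bucket as a conjunction of sift predicates
theorem pvBucket_k1 (loc : String) : (pvBucket loc == "various_london_venues") = pvPred1 loc := by
  unfold pvBucket; split_ifs <;> simp_all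
theorem pvBucket_k2 (loc : String) : (pvBucket loc == "pop_up_touring") = (pvPred2 loc && !pvPred1 loc) := by
  unfold pvBucket; split_ifs <;> simp_all
theorem pvBucket_k3 (loc : String) : (pvBucket loc == "private_undisclosed") = (pvPred3 loc && (!pvPred2 loc && !pvPred1 loc)) := by
  unfold pvBucket; split_ifs <;> simp_all
theorem pvBucket_k4 (loc : String) : (pvBucket loc == "generic_areas") = (pvPred4 loc && (!pvPred3 loc && (!pvPred2 loc && !pvPred1 loc))) := by
  unfold pvBucket; split_ifs <;> simp_all
theorem pvBucket_k5 (loc : String) : (pvBucket loc == "valid_unlisted_neighborhoods") = (!pvPred4 loc && (!pvPred3 loc && (!pvPred2 loc && !pvPred1 loc))) := by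
  unfold pvBucket; split_ifs <;> simp_all

-- B's sieve equals the same grouped form
theorem alt_eq_grouped (manual_review_list : List (List (String × String))) (venues : List (String × List (String × String))) :
    categorize_kept_venues_alt manual_review_list venues
    = pvKeys.map (fun k => (k, ((manual_review_list.map (pvTag venues)).filter (fun p => p.1 == k)).map (·.2))) := by
  have htag : manual_review_list.map (pvTag venues)
      = (manual_review_list.map (pvEntry venues)).map (fun q => (pvBucket q.1, q.2)) := by
    rw [List.map_map]; rfl
  have key : ∀ (k : String) (c : String → Bool), (∀ loc, (pvBucket loc == k) = c loc) →
      (((manual_review_list.map (pvEntry venues)).map (fun q => (pvBucket q.1, q.2))).filter (fun p => p.1 == k)).map (fun p => p.2)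
      = ((manual_review_list.map (pvEntry venues)).filter (fun q => c q.1)).map (fun p => p.2) := by
    intro k c hc
    rw [List.filter_map, List.map_map]
    exact congrArg (List.map _) (List.filter_congr (fun q _ => hc q.1))
  unfold categorize_kept_venues_alt
  dsimp only
  rw [htag]
  simp only [pvKeys, List.map_cons, List.map_nil, List.filter_filter, List.cons.injEq,
    Prod.mk.injEq, true_and, and_true]
  exact ⟨(key _ _ pvBucket_k1).symm, (key _ _ pvBucket_k4).symm, (key _ _ pvBucket_k5).symm,
    (key _ _ pvBucket_k2).symm, (key _ _ pvBucket_k3).symm⟩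

theorem categorize_kept_venues_eq (manual_review_list : List (List (String × String))) (venues : List (String × List (String × String))) :
    categorize_kept_venues manual_review_list venues = categorize_kept_venues_alt manual_review_list venues := by
  rw [categorize_kept_venues_eq_grouped, alt_eq_grouped]

-- ===== VERDICT (by name: the statement is the Claim_ definition above) =====
theorem categorize_kept_venues_spec : Claim_equal_categorize_kept_venues := by
  intro mrl venues _ _
  exact categorize_kept_venues_eq mrl venues
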